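-- pv_equiv track=rewrite | github.com/llomj/python_app | level1_1000-1.py | frequency_first_letter
-- ===== SOURCE A (Python) =====
-- def frequency_first_letter(words):
--     letter_count = {}
--     for word in words:
--         first_letter = word[0]
--         if first_letter in letter_count:
--             letter_count[first_letter] += 1
--         else:
--             letter_count[first_letter] = 1
--
--     def sort(word):
--         return letter_count[word[0]]
--
--     return sorted(words, key=sort)
-- ===== SOURCE B (Python) =====
-- def frequency_first_letter(words):
--     letter_count = {}
--     for word in words:
--         c = word[0]
--         letter_count[c] = letter_count.get(c, 0) + 1
--
--     buckets = {}
--     for word in words: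
--         k = letter_count[word[0]]
--         if k in buckets:
--             buckets[k].append(word)
--         else:
--             buckets[k] = [word]
--
--     result = []
--     for k in sorted(buckets):
--         result.extend(buckets[k])
--     return result
-- ===== Notes on version B (the rewrite author's own statement) =====
-- stated objective: alternative
-- what changed: Replaces the comparison sort over words by a stable bucket grouping: words are appended in original order to per-count buckets, and only the distinct count values are sorted, then the buckets are concatenated in ascending count order.
import Mathlib
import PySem

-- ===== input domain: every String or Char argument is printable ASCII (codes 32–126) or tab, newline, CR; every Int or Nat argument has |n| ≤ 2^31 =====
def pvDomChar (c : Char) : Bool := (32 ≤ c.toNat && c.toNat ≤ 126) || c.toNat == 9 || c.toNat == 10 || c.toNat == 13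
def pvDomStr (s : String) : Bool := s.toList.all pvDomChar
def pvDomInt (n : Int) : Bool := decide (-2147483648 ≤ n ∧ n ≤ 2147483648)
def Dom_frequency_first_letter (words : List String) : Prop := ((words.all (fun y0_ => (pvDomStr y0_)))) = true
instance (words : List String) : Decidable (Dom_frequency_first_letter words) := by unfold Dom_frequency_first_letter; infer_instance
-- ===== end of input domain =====

-- B replaces A's comparison sort of the words by a stable bucket grouping: words are appended
-- in original order to per-count buckets and only the distinct count values are sorted
-- (objective: alternative algorithm, same observable result).

-- ===== PORT A =====
-- shared helper: the sort key 'letter_count[word[0]]' (word[0] via pyGet?; 0 is never used under Pre_)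
def fflKey (lc : PySem.Dict Char Int) (w : String) : Int :=
  match PySem.Str.pyGet? w 0 with
  | some c => lc.getD c 0
  | none => 0

-- A's counting loop: 'if first_letter in letter_count: += 1 else: = 1'
def fflCount (words : List String) : PySem.Dict Char Int :=
  words.foldl (fun d w =>
    match PySem.Str.pyGet? w 0 with
    | none => d        -- IndexError on empty word: outside Pre_
    | some c => if d.contains c then d.insert c (d.getD c 0 + 1) else d.insert c 1)
    PySem.Dict.empty

def frequency_first_letter (words : List String) : List String :=
  let letter_count := fflCount words
  PySem.List.sorted words (fun w => fflKey letter_count w)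

-- ===== PORT B =====
-- B's counting loop: 'letter_count[c] = letter_count.get(c, 0) + 1'
def fflCountB (words : List String) : PySem.Dict Char Int :=
  words.foldl (fun d w =>
    match PySem.Str.pyGet? w 0 with
    | none => d        -- IndexError on empty word: outside Pre_
    | some c => d.insert c (d.getD c 0 + 1))
    PySem.Dict.empty

-- B's grouping loop: append each word (original order) to the bucket of its count value
def fflBuckets (lc : PySem.Dict Char Int) (words : List String) : PySem.Dict Int (List String) :=
  words.foldl (fun b w =>
    let k := fflKey lc w
    match b.get? k with
    | some l => b.insert k (l ++ [w])
    | none => b.insert k [w])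
    PySem.Dict.empty

def frequency_first_letter_alt (words : List String) : List String :=
  let lc := fflCountB words
  let buckets := fflBuckets lc words
  (PySem.List.sorted buckets.keys (fun k => k)).foldl (fun acc k => acc ++ buckets.getD k []) []

-- ===== PRECONDITION & SPEC =====
-- Pre_ excludes lists containing an empty string, on which A raises IndexError at word[0].
def Pre_frequency_first_letter (words : List String) : Prop := ∀ w ∈ words, w ≠ ""
instance (words : List String) : Decidable (Pre_frequency_first_letter words) := by
  unfold Pre_frequency_first_letter; infer_instance
def pvWitness_frequency_first_letter : List String := ["ab", "cd", "a", "x"]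

def Spec_frequency_first_letter (words : List String) (out : List String) : Prop := out = frequency_first_letter_alt words
instance (words : List String) (out : List String) : Decidable (Spec_frequency_first_letter words out) := by unfold Spec_frequency_first_letter; infer_instance

-- ===== CLAIM (what is proved, stated in full; the proofs are below) =====
def Claim_equal_frequency_first_letter : Prop := ∀ (words : List String), Dom_frequency_first_letter words → Pre_frequency_first_letter words → Spec_frequency_first_letter words (frequency_first_letter words)

-- ===== LEMMAS AND PROOFS =====

-- A's and B's counting loops build the same dict.
lemma ffl_count_eq (words : List String) : fflCount words = fflCountB words := by
  unfold fflCount fflCountB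
  apply PySem.List.foldl_congr_mem
  intro d w _
  cases h : PySem.Str.pyGet? w 0 with
  | none => rfl
  | some c =>
    simp only []
    by_cases hc : d.contains c = true
    · simp [hc]
    · simp only [Bool.not_eq_true] at hc
      simp [PySem.Dict.getD_of_not_contains _ _ hc]

-- the bucket step is a 'modify'
lemma ffl_buckets_eq_modify (lc : PySem.Dict Char Int) (words : List String) :
    fflBuckets lc words
      = words.foldl (fun b w => b.modify (fflKey lc w) [] (· ++ [w])) PySem.Dict.empty := by
  unfold fflBuckets
  apply PySem.List.foldl_congr_mem
  intro b w _
  simp only [PySem.Dict.modify]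
  cases h : b.get? (fflKey lc w) with
  | none => simp [PySem.Dict.getD_of_get?_eq_none _ _ h]
  | some l => simp [PySem.Dict.getD_of_get?_eq_some _ _ h]

lemma ffl_buckets_getD (lc : PySem.Dict Char Int) (words : List String) (k : Int) :
    (fflBuckets lc words).getD k [] = words.filter (fun w => fflKey lc w == k) := by
  rw [ffl_buckets_eq_modify]
  have h := PySem.Dict.getD_foldl_modify_append
    (words.map (fun w => (fflKey lc w, w))) (PySem.Dict.empty (κ := Int) (ν := List String)) k
  rw [List.foldl_map] at h
  simp only [] at h
  rw [h]
  simp [List.filter_map, Function.comp_def, List.map_map]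

lemma ffl_buckets_keys (lc : PySem.Dict Char Int) (words : List String) :
    (fflBuckets lc words).keys = PySem.Set.ofList (words.map (fun w => fflKey lc w)) := by
  rw [ffl_buckets_eq_modify]
  have h := PySem.Dict.keys_foldl_modify_key words (fun w => fflKey lc w) []
    (fun _ w => (· ++ [w])) PySem.Dict.empty
  rw [h]
  rfl

-- stability of insertion into a key-sorted list, seen through a per-key filter
lemma filter_insertBy {α : Type} (key : α → Int) (k : Int) (x : α) (ys : List α)
    (h : ys.Pairwise (fun a b => key a ≤ key b)) :
    (PySem.List.insertBy (fun a b => decide (key a < key b)) x ys).filter (fun y => key y == k)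
      = ys.filter (fun y => key y == k) ++ List.filter (fun y => key y == k) [x] := by
  induction ys with
  | nil => simp [PySem.List.insertBy]
  | cons y t ih =>
    rw [List.pairwise_cons] at h
    simp only [PySem.List.insertBy]
    by_cases hlt : key x < key y
    · rw [if_pos (by simpa using hlt)]
      by_cases hk : key x = k
      · have hnil : (y :: t).filter (fun y => key y == k) = [] := by
          apply List.filter_eq_nil_iff.mpr
          intro z hz
          have : key y ≤ key z := by
            rcases hz with _ | hz
            · exact le_refl _
            · exact h.1 z (by assumption)
          simp only [beq_iff_eq]
          omega
        simp [hnil, hk]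
      · simp [List.filter_cons, hk]
    · rw [if_neg (by simpa using hlt)]
      rw [List.filter_cons, List.filter_cons, ih h.2]
      by_cases hy : (key y == k) = true <;> simp [hy]

lemma filter_foldl_insertBy {α : Type} (key : α → Int) (k : Int) :
    ∀ (xs acc : List α), acc.Pairwise (fun a b => key a ≤ key b) →
    (xs.foldl (fun acc x => PySem.List.insertBy (fun a b => decide (key a < key b)) x acc) acc).filter
        (fun y => key y == k)
      = acc.filter (fun y => key y == k) ++ xs.filter (fun y => key y == k) := by
  intro xs
  induction xs with
  | nil => intro acc _; simp
  | cons x t ih =>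
    intro acc hacc
    rw [List.foldl_cons]
    rw [ih _ (PySem.List.insertBy_pairwise_le key x acc hacc)]
    rw [filter_insertBy key k x acc hacc]
    rw [List.filter_cons]
    by_cases hx : (key x == k) = true <;> simp [hx]

lemma filter_sorted {α : Type} (key : α → Int) (k : Int) (xs : List α) :
    (PySem.List.sorted xs key).filter (fun y => key y == k) = xs.filter (fun y => key y == k) := by
  rw [PySem.List.sorted_eq_foldl_insertBy]
  rw [filter_foldl_insertBy key k xs [] (by simp)]
  rfl

-- a key-sorted list splits as (elements with minimal key k) ++ (the rest)
lemma sorted_split {α : Type} (key : α → Int) (k : Int) :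
    ∀ (ys : List α), ys.Pairwise (fun a b => key a ≤ key b) → (∀ y ∈ ys, k ≤ key y) →
    ys = ys.filter (fun y => key y == k) ++ ys.filter (fun y => !(key y == k)) := by
  intro ys
  induction ys with
  | nil => simp
  | cons y t ih =>
    intro hp hmin
    rw [List.pairwise_cons] at hp
    by_cases hy : key y = k
    · have := ih hp.2 (fun z hz => hmin z (List.mem_cons_of_mem _ hz))
      simp only [List.filter_cons, hy, beq_self_eq_true, if_true, Bool.not_true]
      simpa using congrArg (y :: ·) this
    · have hlt : ∀ z ∈ t, ¬ (key z = k) := by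
        intro z hz hzk
        have h1 : k ≤ key y := hmin y (List.mem_cons_self)
        have h2 : key y ≤ key z := hp.1 z hz
        omega
      have h1 : (y :: t).filter (fun y => key y == k) = [] := by
        apply List.filter_eq_nil_iff.mpr
        intro z hz
        rcases hz with _ | hz
        · simp [hy]
        · simp [hlt z (by assumption)]
      have h2 : (y :: t).filter (fun y => !(key y == k)) = y :: t := by
        apply List.filter_eq_self.mpr
        intro z hz
        rcases hz with _ | hz
        · simp [hy]
        · simp [hlt z (by assumption)]
      rw [h1, h2]; rfl

-- flatMap congruence on members
lemma flatMap_congr_mem {α β : Type} {l : List α} {f g : α → List β}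
    (h : ∀ x ∈ l, f x = g x) : l.flatMap f = l.flatMap g := by
  induction l with
  | nil => rfl
  | cons x t ih =>
    rw [List.flatMap_cons, List.flatMap_cons, h x List.mem_cons_self,
      ih (fun z hz => h z (List.mem_cons_of_mem _ hz))]

-- a key-sorted list is the concatenation of its per-key filters over any strictly
-- ascending list K covering its keys
lemma sorted_flatMap_decomp {α : Type} (key : α → Int) :
    ∀ (K : List Int) (ys : List α), ys.Pairwise (fun a b => key a ≤ key b) →
      K.Pairwise (· < ·) → (∀ y ∈ ys, key y ∈ K) →
      ys = K.flatMap (fun k => ys.filter (fun y => key y == k)) := by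
  intro K
  induction K with
  | nil =>
    intro ys _ _ hcov
    cases ys with
    | nil => rfl
    | cons y t => exact absurd (hcov y List.mem_cons_self) (List.not_mem_nil)
  | cons k K' ih =>
    intro ys hp hK hcov
    rw [List.pairwise_cons] at hK
    have hmin : ∀ y ∈ ys, k ≤ key y := by
      intro y hy
      rcases hcov y hy with h | h
      · omega
      · exact le_of_lt (hK.1 _ (by assumption))
    rw [List.flatMap_cons]
    set R := ys.filter (fun y => !(key y == k)) with hR
    have hcongr : K'.flatMap (fun k' => ys.filter (fun y => key y == k'))
        = K'.flatMap (fun k' => R.filter (fun y => key y == k')) := by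
      apply flatMap_congr_mem
      intro k' hk'
      have hkk' : k ≠ k' := by have := hK.1 k' hk'; omega
      rw [hR, List.filter_filter]
      apply List.filter_congr
      intro y _
      by_cases h : key y = k'
      · simp [h, Ne.symm hkk']
      · simp [h]
    rw [hcongr]
    have hRdecomp : R = K'.flatMap (fun k' => R.filter (fun y => key y == k')) := by
      apply ih
      · exact List.Pairwise.sublist List.filter_sublist hp
      · exact hK.2
      · intro y hy
        rw [hR, List.mem_filter] at hy
        rcases List.mem_cons.mp (hcov y hy.1) with h | h
        · exact absurd hy.2 (by simp [h])
        · exact h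
    rw [← hRdecomp]
    exact sorted_split key k ys hp hmin

-- ===== VERDICT (by name: the statement is the Claim_ definition above) =====
theorem frequency_first_letter_spec : Claim_equal_frequency_first_letter := by
  intro words _ _
  unfold Spec_frequency_first_letter frequency_first_letter frequency_first_letter_alt
  rw [← ffl_count_eq]
  set lc := fflCount words with hlc
  set key := fun w => fflKey lc w with hkey
  set buckets := fflBuckets lc words with hbuckets
  rw [PySem.List.foldl_append_eq_flatMap]
  rw [List.nil_append]
  have hkeys : buckets.keys = PySem.Set.ofList (words.map key) := ffl_buckets_keys lc words
  set K := PySem.List.sorted buckets.keys (fun k => k) with hK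
  have hKlt : K.Pairwise (· < ·) := by
    rw [hK, hkeys]
    exact PySem.List.sorted_ofList_pairwise_lt _
  have hcov : ∀ y ∈ PySem.List.sorted words key, key y ∈ K := by
    intro y hy
    rw [PySem.List.mem_sorted] at hy
    rw [hK, PySem.List.mem_sorted, hkeys, PySem.Set.mem_ofList]
    exact List.mem_map_of_mem hy
  have hdecomp := sorted_flatMap_decomp key K (PySem.List.sorted words key)
    (PySem.List.sorted_pairwise words key) hKlt hcov
  rw [hdecomp]
  apply flatMap_congr_mem
  intro k _
  rw [filter_sorted key k words, ffl_buckets_getD lc words k]
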